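-- pv_equiv track=rewrite | github.com/SmirnovVN/leetcode | aoc2024/12/solution.py | cost2
-- ===== SOURCE A (Python) =====
-- directions = [(0, 1), (1, 0), (0, -1), (-1, 0)]
--
-- cdirections = [(1, 1), (1, -1), (-1, -1), (-1, 1)]
--
-- def cost2(matrix):
--     m, n = len(matrix), len(matrix[0])
--     visited = [[0 for _ in range(n)] for _ in range(m)]
--     def traverse(i, j, ch):
--         area, perimeter = 0, 0
--         if visited[i][j]:
--             return area, perimeter
--         visited[i][j] = 1
--         area += 1
--         corner = False
--         for di, dj in directions + [(0, 1)]: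
--             ni, nj = i + di, j + dj
--             if 0 <= ni < m and 0 <= nj < n and matrix[ni][nj] == ch:
--                 na, np = traverse(ni, nj, ch)
--                 area, perimeter = area + na, perimeter + np
--                 corner = False
--             else:
--                 perimeter += int(corner)
--                 corner = True
--         for di, dj in cdirections:
--             ni, nj = i + di, j + dj
--             if 0 <= ni < m and 0 <= nj < n and matrix[ni][nj] != ch:
--                 perimeter += int(matrix[i][nj] == ch and matrix[ni][j] == ch)
--
--         return area, perimeter
--
--     result = 0
--     for i in range(m):
--         for j in range(n):
--             area, perimeter = traverse(i, j, matrix[i][j])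
--             result += area * perimeter
--
--
--     return result
-- ===== SOURCE B (Python) =====
-- directions = [(0, 1), (1, 0), (0, -1), (-1, 0)]
--
-- cdirections = [(1, 1), (1, -1), (-1, -1), (-1, 1)]
--
-- def cost2(matrix):
--     m, n = len(matrix), len(matrix[0])
--     dirs5 = directions + [(0, 1)]
--     visited = [[0] * n for _ in range(m)]
--
--     def same(i, j, ch):
--         # in bounds and carrying the region's character
--         return 0 <= i < m and 0 <= j < n and matrix[i][j] == ch
--
--     def concave_corners(i, j, ch):
--         bonus = 0
--         for di, dj in cdirections:
--             ni, nj = i + di, j + dj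
--             if 0 <= ni < m and 0 <= nj < n and matrix[ni][nj] != ch:
--                 bonus += int(matrix[i][nj] == ch and matrix[ni][j] == ch)
--         return bonus
--
--     def traverse_iter(si, sj, ch):
--         # iterative DFS: an explicit stack of frames [i, j, area, perimeter, corner, k]
--         # (k = next direction index) instead of recursion
--         frames = []
--
--         def enter(i, j):
--             if visited[i][j]:
--                 return (0, 0)
--             visited[i][j] = 1
--             frames.append([i, j, 1, 0, False, 0])
--             return None
--
--         ret = enter(si, sj)
--         while frames:
--             f = frames[-1]
--             if ret is not None:
--                 # a child call just returned: absorb its (area, perimeter)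
--                 f[2] += ret[0]
--                 f[3] += ret[1]
--                 f[4] = False
--                 f[5] += 1
--                 ret = None
--                 continue
--             i, j, k = f[0], f[1], f[5]
--             if k < 5:
--                 di, dj = dirs5[k]
--                 if same(i + di, j + dj, ch):
--                     ret = enter(i + di, j + dj)
--                 else:
--                     f[3] += int(f[4])
--                     f[4] = True
--                     f[5] += 1
--             else:
--                 # all directions done: add concave corners and return to the parent
--                 ret = (f[2], f[3] + concave_corners(i, j, ch))
--                 frames.pop()
--         return ret
--
--     result = 0
--     for si in range(m):
--         for sj in range(n):
--             area, perimeter = traverse_iter(si, sj, matrix[si][sj])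
--             result += area * perimeter
--     return result
-- ===== Notes on version B (the rewrite author's own statement) =====
-- stated objective: alternative
-- what changed: A's recursive flood-fill traverse is replaced by an iterative defunctionalized traversal that keeps an explicit stack of (i, j, area, perimeter, corner, direction-index) frames, so no Python recursion is used (same cost, immune to the recursion depth limit).
import Mathlib
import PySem

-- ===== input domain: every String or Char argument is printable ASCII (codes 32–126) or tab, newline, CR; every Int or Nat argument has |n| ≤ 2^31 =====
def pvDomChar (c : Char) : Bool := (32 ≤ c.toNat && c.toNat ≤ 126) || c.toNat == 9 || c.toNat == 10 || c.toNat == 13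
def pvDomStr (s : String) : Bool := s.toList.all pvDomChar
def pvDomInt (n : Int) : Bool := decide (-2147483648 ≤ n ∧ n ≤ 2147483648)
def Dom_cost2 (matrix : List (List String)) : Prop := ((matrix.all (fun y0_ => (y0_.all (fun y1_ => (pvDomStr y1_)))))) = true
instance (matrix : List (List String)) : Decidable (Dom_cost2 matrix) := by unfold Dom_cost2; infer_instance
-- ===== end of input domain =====

-- B replaces A's recursive DFS by an iterative defunctionalized traversal with an explicit
-- frame stack (same cost; avoids Python's recursion depth limit). Return values only;
-- neither implementation mutates its argument.

-- ===== PORT A =====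
-- shared index helpers: matrix[i][j] / visited[i][j]; every access in both Pythons is
-- bounds-guarded (or guaranteed by Pre_), so the defaults are never consulted there
def getS (matrix : List (List String)) (i j : Int) : String :=
  (PySem.List.pyGet? ((PySem.List.pyGet? matrix i).getD []) j).getD ""

def vget (v : List (List Int)) (i j : Int) : Int :=
  (PySem.List.pyGet? ((PySem.List.pyGet? v i).getD []) j).getD 0

-- visited[i][j] = 1 (indices are always nonnegative and in range at every call site)
def vset (v : List (List Int)) (i j : Int) : List (List Int) :=
  v.set i.toNat ((v.getD i.toNat []).set j.toNat 1)

-- directions + [(0, 1)]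
def dirs5 : List (Int × Int) := [(0, 1), (1, 0), (0, -1), (-1, 0), (0, 1)]

def cdirs : List (Int × Int) := [(1, 1), (1, -1), (-1, -1), (-1, 1)]

-- 0 <= ni < m and 0 <= nj < n
abbrev inb (m n ni nj : Int) : Prop := 0 ≤ ni ∧ ni < m ∧ 0 ≤ nj ∧ nj < n

-- the cdirections loop (identical text in A and in B)
def ccAdd (matrix : List (List String)) (m n : Int) (ch : String) (i j per : Int) : Int :=
  cdirs.foldl (fun acc d =>
    if inb m n (i + d.1) (j + d.2) ∧ getS matrix (i + d.1) (j + d.2) ≠ ch then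
      acc + (if getS matrix i (j + d.2) = ch ∧ getS matrix (i + d.1) j = ch then 1 else 0)
    else acc) per

-- the `for di, dj in directions + [(0,1)]` loop of A's traverse; `tr` is the recursive call
def dirLoopA (matrix : List (List String)) (m n : Int) (ch : String)
    (tr : Int → Int → List (List Int) → Option (Int × Int × List (List Int))) :
    List (Int × Int) → Int → Int → Int → Int → Bool → List (List Int) →
    Option (Int × Int × Bool × List (List Int))
  | [], _, _, area, per, corner, v => some (area, per, corner, v)
  | d :: rest, i, j, area, per, corner, v =>
    if inb m n (i + d.1) (j + d.2) ∧ getS matrix (i + d.1) (j + d.2) = ch then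
      match tr (i + d.1) (j + d.2) v with
      | none => none
      | some (na, np, v') => dirLoopA matrix m n ch tr rest i j (area + na) (per + np) false v'
    else
      dirLoopA matrix m n ch tr rest i j area (per + (if corner then 1 else 0)) true v

-- A's recursive traverse; fuel is only a totality guard (never exhausted: see lemmas below)
def traverseA (matrix : List (List String)) (m n : Int) (ch : String) :
    Nat → Int → Int → List (List Int) → Option (Int × Int × List (List Int))
  | 0, _, _, _ => none
  | f + 1, i, j, v =>
    if vget v i j ≠ 0 then some (0, 0, v)
    else
      match dirLoopA matrix m n ch (fun a b w => traverseA matrix m n ch f a b w)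
          dirs5 i j 1 0 false (vset v i j) with
      | none => none
      | some (a, p, _, v2) => some (a, ccAdd matrix m n ch i j p, v2)

def cost2 (matrix : List (List String)) : Int :=
  ((PySem.List.pyRange 0 (matrix.length : Int) 1).foldl (fun st i =>
    (PySem.List.pyRange 0 (((matrix.headD []).length : Nat) : Int) 1).foldl (fun st j =>
      match traverseA matrix (matrix.length : Int) (((matrix.headD []).length : Nat) : Int)
          (getS matrix i j) (matrix.length * (matrix.headD []).length + 1) i j st.2 with
      | none => st
      | some (a, p, v') => (st.1 + a * p, v')) st)
    ((0 : Int), List.replicate matrix.length (List.replicate (matrix.headD []).length (0 : Int)))).1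

-- ===== PORT B =====
-- one step of B's while loop over the explicit frame stack; a frame is (i, j, area, per, corner, k)
def stepB (matrix : List (List String)) (m n : Int) (ch : String) :
    List (Int × Int × Int × Int × Bool × Nat) × Option (Int × Int) × List (List Int) →
    (List (Int × Int × Int × Int × Bool × Nat) × Option (Int × Int) × List (List Int)) ⊕
      (Int × Int × List (List Int))
  | ([], some r, v) => Sum.inr (r.1, r.2, v)
  | ([], none, v) => Sum.inr (0, 0, v)  -- unreachable: ret is always set when the stack empties
  | ((i, j, area, per, _corner, k) :: rest, some r, v) =>
      -- a child call just returned
      Sum.inl ((i, j, area + r.1, per + r.2, false, k + 1) :: rest, none, v)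
  | ((i, j, area, per, corner, k) :: rest, none, v) =>
      if k < 5 then
        -- di, dj = dirs5[k]
        if inb m n (i + (dirs5.getD k (0, 0)).1) (j + (dirs5.getD k (0, 0)).2) ∧
            getS matrix (i + (dirs5.getD k (0, 0)).1) (j + (dirs5.getD k (0, 0)).2) = ch then
          -- ret = enter(ni, nj)
          if vget v (i + (dirs5.getD k (0, 0)).1) (j + (dirs5.getD k (0, 0)).2) ≠ 0 then
            Sum.inl ((i, j, area, per, corner, k) :: rest, some (0, 0), v)
          else
            Sum.inl ((i + (dirs5.getD k (0, 0)).1, j + (dirs5.getD k (0, 0)).2, 1, 0, false, 0) ::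
              (i, j, area, per, corner, k) :: rest, none,
              vset v (i + (dirs5.getD k (0, 0)).1) (j + (dirs5.getD k (0, 0)).2))
        else
          Sum.inl ((i, j, area, per + (if corner then 1 else 0), true, k + 1) :: rest, none, v)
      else
        -- the cdirections loop, then return to the parent frame
        Sum.inl (rest, some (area, ccAdd matrix m n ch i j per), v)

-- B's while loop; fuel is only a totality guard (never exhausted: see lemmas below)
def runB (matrix : List (List String)) (m n : Int) (ch : String) :
    Nat → List (Int × Int × Int × Int × Bool × Nat) × Option (Int × Int) × List (List Int) →
    Option (Int × Int × List (List Int))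
  | 0, _ => none
  | f + 1, s =>
    match stepB matrix m n ch s with
    | Sum.inr r => some r
    | Sum.inl s' => runB matrix m n ch f s'

-- traverse_iter: the initial enter(si, sj), then the while loop
def traverseB (matrix : List (List String)) (m n : Int) (ch : String) (fuel : Nat)
    (i j : Int) (v : List (List Int)) : Option (Int × Int × List (List Int)) :=
  if vget v i j ≠ 0 then runB matrix m n ch fuel ([], some (0, 0), v)
  else runB matrix m n ch fuel ([(i, j, 1, 0, false, 0)], none, vset v i j)

def cost2_alt (matrix : List (List String)) : Int :=
  ((PySem.List.pyRange 0 (matrix.length : Int) 1).foldl (fun st i =>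
    (PySem.List.pyRange 0 (((matrix.headD []).length : Nat) : Int) 1).foldl (fun st j =>
      match traverseB matrix (matrix.length : Int) (((matrix.headD []).length : Nat) : Int)
          (getS matrix i j) (13 * (matrix.length * (matrix.headD []).length) + 2) i j st.2 with
      | none => st
      | some (a, p, v') => (st.1 + a * p, v')) st)
    ((0 : Int), List.replicate matrix.length (List.replicate (matrix.headD []).length (0 : Int)))).1

-- ===== PRECONDITION & SPEC =====
-- Pre_ excludes exactly the inputs where Python A raises: the empty matrix (IndexError on
-- matrix[0]) and matrices with a row shorter than the first row (IndexError while scanning)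
def Pre_cost2 (matrix : List (List String)) : Prop :=
  matrix ≠ [] ∧ ∀ row ∈ matrix, (matrix.headD []).length ≤ row.length
instance (matrix : List (List String)) : Decidable (Pre_cost2 matrix) := by
  unfold Pre_cost2; infer_instance

def pvWitness_cost2 : List (List String) := [["a", "a"], ["a", "b"]]

def Spec_cost2 (matrix : List (List String)) (out : Int) : Prop := out = cost2_alt matrix
instance (matrix : List (List String)) (out : Int) : Decidable (Spec_cost2 matrix out) := by
  unfold Spec_cost2; infer_instance

-- ===== CLAIM (what is proved, stated in full; the proofs are below) =====
def Claim_equal_cost2 : Prop :=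
  ∀ (matrix : List (List String)), Dom_cost2 matrix → Pre_cost2 matrix →
    Spec_cost2 matrix (cost2 matrix)

-- ===== LEMMAS AND PROOFS =====

-- visited grid shape
def Vsh (v : List (List Int)) (M N : Nat) : Prop := v.length = M ∧ ∀ r ∈ v, r.length = N

-- number of unvisited (zero) cells
def zc (v : List (List Int)) : Nat := (v.map (fun r => r.countP (fun x => x == 0))).sum

-- the state reached right after Python's `ret = enter(i, j)` with frame stack `rest`
def callSt (i j : Int) (v : List (List Int))
    (rest : List (Int × Int × Int × Int × Bool × Nat)) :
    List (Int × Int × Int × Int × Bool × Nat) × Option (Int × Int) × List (List Int) :=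
  if vget v i j ≠ 0 then (rest, some (0, 0), v)
  else ((i, j, 1, 0, false, 0) :: rest, none, vset v i j)

theorem cnt_set_one : ∀ (row : List Int) (b : Nat), b < row.length → row.getD b 1 = 0 →
    (row.set b 1).countP (fun x => x == 0) + 1 = row.countP (fun x => x == 0) := by
  intro row
  induction row with
  | nil => intro b hb; simp at hb
  | cons x tl ih =>
    intro b hb hz
    cases b with
    | zero => simp at hz; subst hz; simp
    | succ b =>
      simp only [List.length_cons, Nat.add_lt_add_iff_right] at hb
      simp only [List.getD_cons_succ] at hz
      simp only [List.set_cons_succ, List.countP_cons]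
      have := ih b hb hz
      omega

theorem zc_set_one : ∀ (v : List (List Int)) (a b : Nat), a < v.length →
    b < (v.getD a []).length → (v.getD a []).getD b 1 = 0 →
    zc (v.set a ((v.getD a []).set b 1)) + 1 = zc v := by
  intro v
  induction v with
  | nil => intro a b ha; simp at ha
  | cons r tl ih =>
    intro a b ha hb hz
    cases a with
    | zero =>
      simp only [List.getD_cons_zero] at hb hz ⊢
      simp only [List.set_cons_zero, zc, List.map_cons, List.sum_cons]
      have := cnt_set_one r b hb hz
      omega
    | succ a =>
      simp only [List.length_cons, Nat.add_lt_add_iff_right] at ha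
      simp only [List.getD_cons_succ] at hb hz ⊢
      simp only [List.set_cons_succ, zc, List.map_cons, List.sum_cons]
      have := ih a b ha hb hz
      simp only [zc] at this
      omega

theorem vget_eq_getD (v : List (List Int)) (i j : Int) (hi0 : 0 ≤ i) (hj0 : 0 ≤ j)
    (hi : i.toNat < v.length) (hj : j.toNat < (v.getD i.toNat []).length) :
    vget v i j = (v.getD i.toNat []).getD j.toNat 0 := by
  unfold vget
  rw [PySem.List.pyGet?_of_nonneg v hi0]
  rw [List.getElem?_eq_getElem hi]
  simp only [Option.getD_some]
  rw [PySem.List.pyGet?_of_nonneg _ hj0]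
  rw [List.getD_eq_getElem?_getD, List.getD_eq_getElem?_getD,
    List.getElem?_eq_getElem hi]
  simp only [Option.getD_some]

-- marking an unvisited in-range cell: shape is preserved and the zero count drops by one
theorem mark_lemma (v : List (List Int)) (M N : Nat) (i j : Int)
    (hv : Vsh v M N) (hi0 : 0 ≤ i) (hi : i < (M : Int)) (hj0 : 0 ≤ j) (hj : j < (N : Int))
    (hz : vget v i j = 0) :
    Vsh (vset v i j) M N ∧ zc (vset v i j) + 1 = zc v := by
  obtain ⟨hlen, hrows⟩ := hv
  have hia : i.toNat < v.length := by omega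
  have hmem : v.getD i.toNat [] ∈ v := by
    rw [List.getD_eq_getElem _ _ hia]
    exact List.getElem_mem hia
  have hrow : (v.getD i.toNat []).length = N := hrows _ hmem
  have hjb : j.toNat < (v.getD i.toNat []).length := by omega
  have hz' : (v.getD i.toNat []).getD j.toNat 1 = 0 := by
    have h1 := vget_eq_getD v i j hi0 hj0 hia hjb
    rw [hz] at h1
    rw [List.getD_eq_getElem _ _ hjb] at h1 ⊢
    omega
  refine ⟨⟨?_, ?_⟩, zc_set_one v i.toNat j.toNat hia hjb hz'⟩
  · simp [vset, hlen]
  · intro r hr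
    rcases List.mem_or_eq_of_mem_set hr with h | h
    · exact hrows r h
    · subst h
      rw [List.length_set]
      exact hrow

theorem zc_le (v : List (List Int)) (M N : Nat) (hv : Vsh v M N) : zc v ≤ M * N := by
  obtain ⟨hlen, hrows⟩ := hv
  unfold zc
  calc (v.map (fun r => r.countP (fun x => x == 0))).sum
      ≤ (v.map (fun _ => N)).sum := by
        apply List.sum_le_sum
        intro r hr
        have h1 := List.countP_le_length (l := r) (p := fun x => x == 0)
        rw [hrows r hr] at h1
        exact h1
    _ = M * N := by
        rw [List.map_const', List.sum_replicate, hlen, smul_eq_mul]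

-- `RunM c s t`: the machine goes from state s to state t in exactly c non-terminal steps
inductive RunM (matrix : List (List String)) (m n : Int) (ch : String) :
    Nat → (List (Int × Int × Int × Int × Bool × Nat) × Option (Int × Int) × List (List Int)) →
    (List (Int × Int × Int × Int × Bool × Nat) × Option (Int × Int) × List (List Int)) → Prop where
  | refl (s) : RunM matrix m n ch 0 s s
  | step {c s s' t} (h : stepB matrix m n ch s = Sum.inl s')
      (hr : RunM matrix m n ch c s' t) : RunM matrix m n ch (c + 1) s t

theorem runM_trans {matrix : List (List String)} {m n : Int} {ch : String} {c1 c2 : Nat}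
    {s t u : List (Int × Int × Int × Int × Bool × Nat) × Option (Int × Int) × List (List Int)}
    (h1 : RunM matrix m n ch c1 s t) (h2 : RunM matrix m n ch c2 t u) :
    RunM matrix m n ch (c1 + c2) s u := by
  induction h1 with
  | refl s => simpa using h2
  | step h hr ih =>
    rename_i c s1 s2 t1
    have hstep := RunM.step h (ih h2)
    have heq : c + c2 + 1 = c + 1 + c2 := by omega
    rwa [heq] at hstep

theorem runB_of_runM {matrix : List (List String)} {m n : Int} {ch : String} {c : Nat}
    {s t : List (Int × Int × Int × Int × Bool × Nat) × Option (Int × Int) × List (List Int)}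
    (h : RunM matrix m n ch c s t) (f : Nat) :
    runB matrix m n ch (c + f) s = runB matrix m n ch f t := by
  induction h with
  | refl s => simp
  | step h hr ih =>
    rename_i c' s1 s2 t1
    have heq : c' + 1 + f = c' + f + 1 := by omega
    rw [heq, runB, h]
    exact ih

theorem dirs5_drop (k : Nat) (hk : k < 5) :
    dirs5.drop k = dirs5.getD k (0, 0) :: dirs5.drop (k + 1) := by
  interval_cases k <;> rfl

-- simulation of A's direction loop (from direction index k) by B's machine
theorem simDir (matrix : List (List String)) (m n : Int) (ch : String) (F : Nat)
    (tr : Int → Int → List (List Int) → Option (Int × Int × List (List Int)))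
    (Htr : ∀ (i j : Int) (v : List (List Int)), Vsh v m.toNat n.toNat →
      0 ≤ i → i < m → 0 ≤ j → j < n → zc v < F →
      ∃ a p v', tr i j v = some (a, p, v') ∧ Vsh v' m.toNat n.toNat ∧
        ∀ rest, ∃ c, RunM matrix m n ch c (callSt i j v rest) (rest, some (a, p), v') ∧
          c + 13 * zc v' ≤ 13 * zc v) :
    ∀ (r k : Nat), k + r = 5 → ∀ (i j area per : Int) (corner : Bool) (v : List (List Int)),
      Vsh v m.toNat n.toNat → zc v < F →
      ∃ a p cnr v2,
        dirLoopA matrix m n ch tr (dirs5.drop k) i j area per corner v = some (a, p, cnr, v2) ∧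
        Vsh v2 m.toNat n.toNat ∧ zc v2 ≤ zc v ∧
        ∀ rest, ∃ c,
          RunM matrix m n ch c ((i, j, area, per, corner, k) :: rest, none, v)
            ((i, j, a, p, cnr, 5) :: rest, none, v2) ∧
          c + 13 * zc v2 ≤ 13 * zc v + 2 * r := by
  intro r
  induction r with
  | zero =>
    intro k hk i j area per corner v hv hF
    have hk5 : k = 5 := by omega
    subst hk5
    refine ⟨area, per, corner, v, by simp [dirs5, dirLoopA], hv, le_refl _, ?_⟩
    intro rest
    exact ⟨0, RunM.refl _, by omega⟩
  | succ r ih =>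
    intro k hk i j area per corner v hv hF
    have hk5 : k < 5 := by omega
    rw [dirs5_drop k hk5]
    by_cases hg : inb m n (i + (dirs5.getD k (0, 0)).1) (j + (dirs5.getD k (0, 0)).2) ∧
        getS matrix (i + (dirs5.getD k (0, 0)).1) (j + (dirs5.getD k (0, 0)).2) = ch
    · -- call direction
      obtain ⟨⟨hni0, hni, hnj0, hnj⟩, hch⟩ := hg
      obtain ⟨na, np, v', htr, hv', hrun⟩ :=
        Htr (i + (dirs5.getD k (0, 0)).1) (j + (dirs5.getD k (0, 0)).2) v hv hni0 hni hnj0 hnj hF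
    -- zc never increases across a child call
      have hzv' : zc v' ≤ zc v := by
        obtain ⟨c, _, hc⟩ := hrun []
        omega
      obtain ⟨a, p, cnr, v2, hloop, hv2, hz2, hrun2⟩ :=
        ih (k + 1) (by omega) i j (area + na) (per + np) false v' hv' (by omega)
      have hgg : inb m n (i + (dirs5.getD k (0, 0)).1) (j + (dirs5.getD k (0, 0)).2) ∧
          getS matrix (i + (dirs5.getD k (0, 0)).1) (j + (dirs5.getD k (0, 0)).2) = ch :=
        ⟨⟨hni0, hni, hnj0, hnj⟩, hch⟩
      refine ⟨a, p, cnr, v2, ?_, hv2, by omega, ?_⟩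
      · simp only [dirLoopA, htr]
        rw [if_pos hgg]
        exact hloop
      · intro rest
        obtain ⟨cc, hcc, hccb⟩ := hrun ((i, j, area, per, corner, k) :: rest)
        obtain ⟨c2, hc2, hc2b⟩ := hrun2 rest
        -- step 1: the machine performs enter(ni, nj), reaching callSt
        have hstep1 : stepB matrix m n ch ((i, j, area, per, corner, k) :: rest, none, v) =
            Sum.inl (callSt (i + (dirs5.getD k (0, 0)).1) (j + (dirs5.getD k (0, 0)).2) v
              ((i, j, area, per, corner, k) :: rest)) := by
          simp only [stepB, callSt]
          rw [if_pos hk5, if_pos hgg]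
          by_cases hvis : vget v (i + (dirs5.getD k (0, 0)).1) (j + (dirs5.getD k (0, 0)).2) ≠ 0
          · rw [if_pos hvis, if_pos hvis]
          · rw [if_neg hvis, if_neg hvis]
        -- step 2: consume the returned value
        have hstep2 : stepB matrix m n ch
            ((i, j, area, per, corner, k) :: rest, some (na, np), v') =
            Sum.inl ((i, j, area + na, per + np, false, k + 1) :: rest, none, v') := rfl
        have h23 : RunM matrix m n ch (c2 + 1)
            ((i, j, area, per, corner, k) :: rest, some (na, np), v')
            ((i, j, a, p, cnr, 5) :: rest, none, v2) := RunM.step hstep2 hc2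
        have h123 := runM_trans hcc h23
        have hall := RunM.step hstep1 h123
        refine ⟨cc + (c2 + 1) + 1, hall, by omega⟩
    · -- non-call direction
      obtain ⟨a, p, cnr, v2, hloop, hv2, hz2, hrun2⟩ :=
        ih (k + 1) (by omega) i j area (per + (if corner then 1 else 0)) true v hv hF
      refine ⟨a, p, cnr, v2, ?_, hv2, hz2, ?_⟩
      · simp only [dirLoopA]
        rw [if_neg hg]
        exact hloop
      · intro rest
        obtain ⟨c2, hc2, hc2b⟩ := hrun2 rest
        have hstep : stepB matrix m n ch ((i, j, area, per, corner, k) :: rest, none, v) =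
            Sum.inl ((i, j, area, per + (if corner then 1 else 0), true, k + 1) :: rest,
              none, v) := by
          simp only [stepB]
          rw [if_pos hk5, if_neg hg]
        exact ⟨c2 + 1, RunM.step hstep hc2, by omega⟩

-- main simulation: A's traverse is mirrored by B's machine, with a step bound
theorem simA (matrix : List (List String)) (m n : Int) (ch : String) :
    ∀ (f : Nat) (i j : Int) (v : List (List Int)),
      Vsh v m.toNat n.toNat → 0 ≤ i → i < m → 0 ≤ j → j < n → zc v < f →
      ∃ a p v', traverseA matrix m n ch f i j v = some (a, p, v') ∧ Vsh v' m.toNat n.toNat ∧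
        ∀ rest, ∃ c, RunM matrix m n ch c (callSt i j v rest) (rest, some (a, p), v') ∧
          c + 13 * zc v' ≤ 13 * zc v := by
  intro f
  induction f with
  | zero => intro i j v _ _ _ _ _ hzf; omega
  | succ f ih =>
    intro i j v hv hi0 hi hj0 hj hzf
    by_cases hvis : vget v i j ≠ 0
    · refine ⟨0, 0, v, by simp [traverseA, hvis], hv, ?_⟩
      intro rest
      refine ⟨0, ?_, by omega⟩
      unfold callSt
      rw [if_pos hvis]
      exact RunM.refl _
    · have hvis0 : vget v i j = 0 := by omega
      have hMi : i < ((m.toNat : Nat) : Int) := by omega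
      have hNj : j < ((n.toNat : Nat) : Int) := by omega
      obtain ⟨hv1, hzc1⟩ := mark_lemma v m.toNat n.toNat i j hv hi0 hMi hj0 hNj hvis0
      obtain ⟨a, p, cnr, v2, hloop, hv2, hz2, hrun⟩ :=
        simDir matrix m n ch f (fun a b w => traverseA matrix m n ch f a b w) ih 5 0 rfl
          i j 1 0 false (vset v i j) hv1 (by omega)
      have hdrop : dirs5.drop 0 = dirs5 := rfl
      rw [hdrop] at hloop
      refine ⟨a, ccAdd matrix m n ch i j p, v2, ?_, hv2, ?_⟩
      · simp only [traverseA]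
        rw [if_neg hvis, hloop]
      · intro rest
        obtain ⟨c, hc, hcb⟩ := hrun rest
        have hpop : stepB matrix m n ch ((i, j, a, p, cnr, 5) :: rest, none, v2) =
            Sum.inl (rest, some (a, ccAdd matrix m n ch i j p), v2) := by
          simp only [stepB]
          rw [if_neg (by omega : ¬ (5 : Nat) < 5)]
        refine ⟨c + 1, ?_, by omega⟩
        unfold callSt
        rw [if_neg hvis]
        exact runM_trans hc (RunM.step hpop (RunM.refl _))

-- generic lockstep fold lemma
theorem foldl_congr_states {α β : Type} (L : List α) (fA fB : β → α → β) (P : β → Prop)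
    (h : ∀ st a, a ∈ L → P st → fA st a = fB st a ∧ P (fA st a)) :
    ∀ st, P st → L.foldl fA st = L.foldl fB st ∧ P (L.foldl fA st) := by
  induction L with
  | nil => intro st hst; exact ⟨rfl, hst⟩
  | cons x tl ih =>
    intro st hst
    obtain ⟨heq, hP⟩ := h st x (by simp) hst
    simp only [List.foldl_cons]
    rw [← heq]
    exact ih (fun st a ha hP' => h st a (by simp [ha]) hP') (fA st x) hP

theorem traverseB_eq_runB (matrix : List (List String)) (m n : Int) (ch : String)
    (fuel : Nat) (i j : Int) (v : List (List Int)) :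
    traverseB matrix m n ch fuel i j v = runB matrix m n ch fuel (callSt i j v []) := by
  unfold traverseB callSt
  by_cases hvis : vget v i j ≠ 0
  · rw [if_pos hvis, if_pos hvis]
  · rw [if_neg hvis, if_neg hvis]

-- per-cell lockstep: both ports' loop bodies produce the same state and preserve the shape
theorem cell_eq (matrix : List (List String)) (M N : Nat) (i j : Int)
    (st : Int × List (List Int)) (hv : Vsh st.2 M N)
    (hi0 : 0 ≤ i) (hi : i < (M : Int)) (hj0 : 0 ≤ j) (hj : j < (N : Int)) :
    (match traverseA matrix (M : Int) (N : Int) (getS matrix i j) (M * N + 1) i j st.2 with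
      | none => st
      | some (a, p, v') => (st.1 + a * p, v')) =
    (match traverseB matrix (M : Int) (N : Int) (getS matrix i j)
        (13 * (M * N) + 2) i j st.2 with
      | none => st
      | some (a, p, v') => (st.1 + a * p, v')) ∧
    Vsh (match traverseA matrix (M : Int) (N : Int) (getS matrix i j)
        (M * N + 1) i j st.2 with
      | none => st
      | some (a, p, v') => (st.1 + a * p, v')).2 M N := by
  have hzc : zc st.2 ≤ M * N := zc_le st.2 M N hv
  have hv' : Vsh st.2 ((M : Int)).toNat ((N : Int)).toNat := by
    simpa using hv
  obtain ⟨a, p, v', hA, hvv', hrun⟩ :=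
    simA matrix (M : Int) (N : Int) (getS matrix i j) (M * N + 1) i j st.2
      hv' hi0 hi hj0 hj (by omega)
  obtain ⟨c, hc, hcb⟩ := hrun []
  have hcle : c ≤ 13 * (M * N) := by omega
  have hB : traverseB matrix (M : Int) (N : Int) (getS matrix i j)
      (13 * (M * N) + 2) i j st.2 = some (a, p, v') := by
    rw [traverseB_eq_runB]
    have hsplit : 13 * (M * N) + 2 = c + (13 * (M * N) + 2 - c) := by omega
    rw [hsplit, runB_of_runM hc]
    obtain ⟨g, hg⟩ : ∃ g, 13 * (M * N) + 2 - c = g + 1 := ⟨13 * (M * N) + 1 - c, by omega⟩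
    rw [hg, runB]
    rfl
  rw [hA, hB]
  exact ⟨rfl, by simpa using hvv'⟩

-- one row of the main double loop, in lockstep
theorem row_eq (matrix : List (List String)) (M N : Nat) (i : Int)
    (hi0 : 0 ≤ i) (hi : i < (M : Int)) :
    ∀ st : Int × List (List Int), Vsh st.2 M N →
      (PySem.List.pyRange 0 (N : Int) 1).foldl (fun st j =>
          match traverseA matrix (M : Int) (N : Int) (getS matrix i j)
              (M * N + 1) i j st.2 with
          | none => st
          | some (a, p, v') => (st.1 + a * p, v')) st =
        (PySem.List.pyRange 0 (N : Int) 1).foldl (fun st j =>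
          match traverseB matrix (M : Int) (N : Int) (getS matrix i j)
              (13 * (M * N) + 2) i j st.2 with
          | none => st
          | some (a, p, v') => (st.1 + a * p, v')) st ∧
      Vsh ((PySem.List.pyRange 0 (N : Int) 1).foldl (fun st j =>
          match traverseA matrix (M : Int) (N : Int) (getS matrix i j)
              (M * N + 1) i j st.2 with
          | none => st
          | some (a, p, v') => (st.1 + a * p, v')) st).2 M N := by
  intro st hst
  exact foldl_congr_states (PySem.List.pyRange 0 (N : Int) 1) _ _
    (fun st => Vsh st.2 M N)
    (fun st j hj hP => by
      have hjb := (PySem.List.mem_pyRange_one).mp hj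
      exact cell_eq matrix M N i j st hP hi0 hi hjb.1 hjb.2) st hst

theorem cost2_eq_alt (matrix : List (List String)) : cost2 matrix = cost2_alt matrix := by
  unfold cost2 cost2_alt
  have hv0sh : Vsh (List.replicate matrix.length (List.replicate (matrix.headD []).length (0 : Int)))
      matrix.length (matrix.headD []).length := by
    constructor
    · simp
    · intro r hr
      rw [List.eq_of_mem_replicate hr]
      simp
  have main := foldl_congr_states (PySem.List.pyRange 0 (matrix.length : Int) 1) _ _
    (fun st : Int × List (List Int) => Vsh st.2 matrix.length (matrix.headD []).length)
    (fun st i hi hP =>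
      row_eq matrix matrix.length (matrix.headD []).length i
        ((PySem.List.mem_pyRange_one).mp hi).1 ((PySem.List.mem_pyRange_one).mp hi).2 st hP)
    ((0 : Int), List.replicate matrix.length (List.replicate (matrix.headD []).length (0 : Int)))
    hv0sh
  rw [main.1]

-- ===== VERDICT (by name: the statement is the Claim_ definition above) =====
theorem cost2_spec : Claim_equal_cost2 := by
  intro matrix _ _
  unfold Spec_cost2
  exact cost2_eq_alt matrix
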